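-- pv_equiv track=rewrite | github.com/nishatrhythm/Cryptography-and-Information-Security-Lab | KeyedTranspositionCipher.py | get_key_order
-- ===== SOURCE A (Python) =====
-- def get_key_order(key):
--     key = key.upper()
--     sorted_key = sorted(list(key))
--     key_order = []
--
--     for char in key:
--         index = sorted_key.index(char)
--         key_order.append(index)
--         sorted_key[index] = None  # Mark as used
--
--     return key_order
-- ===== SOURCE B (Python) =====
-- def get_key_order(key):
--     key = key.upper()
--     counts = {}
--     for ch in key:
--         counts[ch] = counts.get(ch, 0) + 1
--     start = {}
--     i = 0
--     for ch in sorted(counts):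
--         start[ch] = i
--         i += counts[ch]
--     seen = {}
--     order = []
--     for ch in key:
--         r = seen.get(ch, 0)
--         seen[ch] = r + 1
--         order.append(start[ch] + r)
--     return order
-- ===== Notes on version B (the rewrite author's own statement) =====
-- stated objective: faster
-- what changed: Instead of repeatedly scanning a mutable sorted copy with list.index and marking used slots None, B counts each character once, derives each character's start rank from a cumulative sum over the sorted distinct characters, and emits start[ch]+seen[ch] in a single pass with a per-character counter.
import Mathlib
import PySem

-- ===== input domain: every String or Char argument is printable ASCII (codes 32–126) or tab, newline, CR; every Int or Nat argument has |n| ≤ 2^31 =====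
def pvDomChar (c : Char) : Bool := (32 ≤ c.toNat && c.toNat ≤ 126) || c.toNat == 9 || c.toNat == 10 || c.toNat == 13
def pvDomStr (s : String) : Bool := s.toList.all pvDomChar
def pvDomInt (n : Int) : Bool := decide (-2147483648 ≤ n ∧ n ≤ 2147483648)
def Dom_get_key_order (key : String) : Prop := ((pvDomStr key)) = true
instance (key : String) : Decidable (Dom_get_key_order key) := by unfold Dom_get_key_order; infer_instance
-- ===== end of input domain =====

-- B replaces A's repeated list.index scans over a mutable sorted copy by one counting
-- pass + cumulative starts over the sorted distinct characters (objective: faster).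

-- ===== PORT A =====
-- sorted_key holds chars that are later overwritten with None: modelled as List (Option Char).
def get_key_order (key : String) : List Int :=
  let k := (PySem.Str.upper key).toList
  let sortedKey : List (Option Char) := (PySem.List.sorted k (fun c => c) false).map some
  (k.foldl
    (fun (st : List (Option Char) × List Int) (c : Char) =>
      -- sorted_key.index(char): the char is always still present, so ValueError never
      -- occurs; the .getD 0 default is unreachable
      let idx : Nat := (PySem.List.index? st.1 (some c)).getD 0
      (st.1.set idx none, st.2 ++ [(idx : Int)]))
    (sortedKey, [])).2

-- ===== PORT B =====
def get_key_order_alt (key : String) : List Int :=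
  let k := (PySem.Str.upper key).toList
  let counts : PySem.Dict Char Int :=
    k.foldl (fun d c => d.insert c (d.getD c 0 + 1)) PySem.Dict.empty
  let start : PySem.Dict Char Int :=
    ((PySem.List.sorted counts.keys (fun c => c) false).foldl
      (fun (p : PySem.Dict Char Int × Int) c => (p.1.insert c p.2, p.2 + counts.getD c 0))
      (PySem.Dict.empty, 0)).1
  -- start[ch]: every ch of key is a key of start, so KeyError never occurs; getD 0 unreachable
  (k.foldl
    (fun (st : PySem.Dict Char Int × List Int) (c : Char) =>
      let r := st.1.getD c 0
      (st.1.insert c (r + 1), st.2 ++ [start.getD c 0 + r]))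
    (PySem.Dict.empty, [])).2

-- ===== PRECONDITION & SPEC =====
def Spec_get_key_order (key : String) (out : List Int) : Prop := out = get_key_order_alt key
instance (key : String) (out : List Int) : Decidable (Spec_get_key_order key out) := by unfold Spec_get_key_order; infer_instance

-- ===== CLAIM (what is proved, stated in full; the proofs are below) =====
def Claim_equal_get_key_order : Prop := ∀ (key : String), Dom_get_key_order key → Spec_get_key_order key (get_key_order key)

-- ===== LEMMAS AND PROOFS =====

-- the common reference value: rank of char c of key k after prefix pre =
-- (#chars of k below c) + (#occurrences of c already consumed in pre)
def pvRank (k pre : List Char) (c : Char) : Int :=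
  (k.countP (fun d => decide (d < c)) : Int) + (pre.count c : Int)

def pvRankAux (k : List Char) : List Char → List Char → List Int
  | _, [] => []
  | pre, c :: t => pvRank k pre c :: pvRankAux k (pre ++ [c]) t

-- A's mutable sorted list with the first (u c) occurrences of each char c replaced by None
def pvMask : List Char → (Char → Nat) → List (Option Char)
  | [], _ => []
  | c :: t, u => (if u c = 0 then some c else none) :: pvMask t (fun d => if d = c then u c - 1 else u d)

lemma pvMask_zero (s : List Char) : pvMask s (fun _ => 0) = s.map some := by
  induction s with
  | nil => rfl
  | cons a t ih =>
      have hu : (fun d => if d = a then 0 - 1 else 0) = (fun _ : Char => (0 : Nat)) := by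
        funext d; split <;> rfl
      simp [pvMask, hu, ih]

lemma pv_countP_lt_zero (t : List Char) (a c : Char) (h : ∀ x ∈ t, a ≤ x) (hc : c ≤ a) :
    t.countP (fun d => decide (d < c)) = 0 := by
  rw [List.countP_eq_zero]
  intro x hx
  simp only [decide_eq_true_eq]
  exact fun hlt => absurd (lt_of_lt_of_le hlt hc) (not_lt.mpr (h x hx))

lemma pv_count_zero (t : List Char) (a c : Char) (h : ∀ x ∈ t, a ≤ x) (hc : c < a) :
    t.count c = 0 := by
  rw [List.count_eq_zero]
  exact fun hm => absurd (lt_of_lt_of_le hc (h c hm)) (lt_irrefl c)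

lemma pvMask_index (s : List Char) : s.Pairwise (· ≤ ·) → ∀ (u : Char → Nat) (c : Char),
    u c < s.count c →
    PySem.List.index? (pvMask s u) (some c)
      = some (s.countP (fun d => decide (d < c)) + u c) := by
  induction s with
  | nil => intro _ u c hu; simp at hu
  | cons a t ih =>
      intro hp u c hu
      rw [List.pairwise_cons] at hp
      obtain ⟨ha, hp'⟩ := hp
      have hmask : pvMask (a :: t) u
          = (if u a = 0 then some a else none) :: pvMask t (fun d => if d = a then u a - 1 else u d) := rfl
      by_cases hac : a = c
      · subst hac
        have hcount0 : t.countP (fun d => decide (d < a)) = 0 := pv_countP_lt_zero t a a ha le_rfl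
        have hcnt : (a :: t).countP (fun d => decide (d < a)) = 0 := by
          rw [List.countP_cons]; simp [hcount0]
        by_cases h0 : u a = 0
        · rw [hcnt, h0, hmask, if_pos h0, PySem.List.index?_cons_self]
        · have hne : (none : Option Char) ≠ some a := by simp
          rw [hmask, if_neg h0, PySem.List.index?_cons_of_ne _ hne]
          have hca : (a :: t).count a = t.count a + 1 := by simp [List.count_cons]
          have hu' : (fun d => if d = a then u a - 1 else u d) a < t.count a := by
            show (if a = a then u a - 1 else u a) < t.count a
            rw [if_pos rfl]; omega
          rw [ih hp' _ a hu', hcnt]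
          simp [hcount0]
          omega
      · have hca' : ¬ c = a := fun h => hac (Eq.symm h)
        have hne : (if u a = 0 then some a else none) ≠ some c := by
          by_cases h0 : u a = 0
          · rw [if_pos h0]
            intro h
            injection h with h'
            exact hac h'
          · rw [if_neg h0]
            intro h
            exact (nomatch h)
        rw [hmask, PySem.List.index?_cons_of_ne _ hne]
        have hcc : (a :: t).count c = t.count c := by
          rw [List.count_cons_of_ne hac]
        rcases lt_or_gt_of_ne hac with hlt | hgt
        · have hu' : (fun d => if d = a then u a - 1 else u d) c < t.count c := by
            show (if c = a then u a - 1 else u c) < t.count c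
            rw [if_neg hca']; omega
          rw [ih hp' _ c hu', List.countP_cons]
          simp [hca', hlt]
          omega
        · exfalso
          have h1 : t.count c = 0 := pv_count_zero t a c ha hgt
          omega

lemma pvMask_set (s : List Char) : s.Pairwise (· ≤ ·) → ∀ (u : Char → Nat) (c : Char),
    u c < s.count c →
    (pvMask s u).set (s.countP (fun d => decide (d < c)) + u c) none
      = pvMask s (fun d => if d = c then u c + 1 else u d) := by
  induction s with
  | nil => intro _ u c hu; simp at hu
  | cons a t ih =>
      intro hp u c hu
      rw [List.pairwise_cons] at hp
      obtain ⟨ha, hp'⟩ := hp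
      have hmask : ∀ v : Char → Nat, pvMask (a :: t) v
          = (if v a = 0 then some a else none) :: pvMask t (fun d => if d = a then v a - 1 else v d) :=
        fun _ => rfl
      by_cases hac : a = c
      · subst hac
        have hcount0 : t.countP (fun d => decide (d < a)) = 0 := pv_countP_lt_zero t a a ha le_rfl
        have hcnt : (a :: t).countP (fun d => decide (d < a)) = 0 := by
          rw [List.countP_cons]; simp [hcount0]
        have hca : (a :: t).count a = t.count a + 1 := by simp [List.count_cons]
        have hrhs : pvMask (a :: t) (fun d => if d = a then u a + 1 else u d)
            = none :: pvMask t (fun d => if d = a then u a else u d) := by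
          rw [hmask]
          congr 1
          · simp
          · congr 1
            funext d
            by_cases hd : d = a
            · subst hd; simp
            · simp [hd]
        by_cases h0 : u a = 0
        · rw [hrhs, hcnt, h0, hmask u, if_pos h0, List.set_cons_zero]
          congr 1
          congr 1
          funext d
          by_cases hd : d = a
          · subst hd; simp [h0]
          · simp [hd]
        · obtain ⟨m, hm⟩ : ∃ m, u a = m + 1 := ⟨u a - 1, by omega⟩
          rw [hrhs, hcnt, hmask u, if_neg h0, Nat.zero_add, hm, List.set_cons_succ]
          congr 1
          have hstep : (fun d => if d = a then m + 1 - 1 else u d)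
              = (fun d => if d = a then m else u d) := by
            funext d; by_cases hd : d = a <;> simp [hd]
          rw [hstep]
          have hu' : (fun d => if d = a then m else u d) a < t.count a := by
            show (if a = a then m else u a) < t.count a
            rw [if_pos rfl]; omega
          have hIH := ih hp' (fun d => if d = a then m else u d) a hu'
          rw [hcount0, Nat.zero_add] at hIH
          have hidx : (if a = a then m else u a) = m := if_pos rfl
          beta_reduce at hIH
          rw [hidx] at hIH
          rw [hIH]
          congr 1
          funext d
          by_cases hd : d = a <;> simp [hd, hm]
      · have hca' : ¬ c = a := fun h => hac (Eq.symm h)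
        have hcc : (a :: t).count c = t.count c := by
          rw [List.count_cons_of_ne hac]
        rcases lt_or_gt_of_ne hac with hlt | hgt
        · have hcp : (a :: t).countP (fun d => decide (d < c))
              = t.countP (fun d => decide (d < c)) + 1 := by
            rw [List.countP_cons]; simp [hlt]
          have hrhs : pvMask (a :: t) (fun d => if d = c then u c + 1 else u d)
              = (if u a = 0 then some a else none)
                :: pvMask t (fun d => if d = a then u a - 1 else if d = c then u c + 1 else u d) := by
            rw [hmask]
            congr 1
            · simp [hac]
            · congr 1
              funext d
              by_cases hd : d = a
              · subst hd; simp [hac]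
              · simp [hd]
          rw [hrhs, hcp, hmask u,
              show t.countP (fun d => decide (d < c)) + 1 + u c
                = (t.countP (fun d => decide (d < c)) + u c) + 1 from by omega,
              List.set_cons_succ]
          congr 1
          have hu' : (fun d => if d = a then u a - 1 else u d) c < t.count c := by
            show (if c = a then u a - 1 else u c) < t.count c
            rw [if_neg hca']; omega
          have hIH := ih hp' (fun d => if d = a then u a - 1 else u d) c hu'
          have hidx : (if c = a then u a - 1 else u c) = u c := if_neg hca'
          beta_reduce at hIH
          rw [hidx] at hIH
          rw [hIH]
          congr 1
          funext d
          by_cases hd : d = c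
          · subst hd; simp [hca']
          · by_cases hda : d = a
            · subst hda; simp [hd, hac]
            · simp [hd, hda]
        · exfalso
          have h1 : t.count c = 0 := pv_count_zero t a c ha hgt
          omega

lemma pv_loopA (k : List Char) : ∀ (rest pre : List Char) (acc : List Int), k = pre ++ rest →
    (rest.foldl (fun (st : List (Option Char) × List Int) (c : Char) =>
        (st.1.set ((PySem.List.index? st.1 (some c)).getD 0) none,
         st.2 ++ [(((PySem.List.index? st.1 (some c)).getD 0 : Nat) : Int)]))
      (pvMask (PySem.List.sorted k (fun c => c) false) (fun d => pre.count d), acc)).2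
    = acc ++ pvRankAux k pre rest := by
  intro rest
  induction rest with
  | nil => intro pre acc _; simp [pvRankAux]
  | cons c t ih =>
      intro pre acc hk
      have hperm := PySem.List.sorted_perm k (fun c => c) false
      have hs : (PySem.List.sorted k (fun c => c) false).Pairwise (· ≤ ·) :=
        PySem.List.sorted_pairwise k (fun c => c)
      have hcntk : k.count c = pre.count c + (t.count c + 1) := by
        subst hk; simp [List.count_append, List.count_cons]
      have hcnts : (PySem.List.sorted k (fun c => c) false).count c = k.count c :=
        hperm.count_eq c
      have hu : (fun d => pre.count d) c < (PySem.List.sorted k (fun c => c) false).count c := by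
        show pre.count c < _; omega
      have hidx := pvMask_index _ hs (fun d => pre.count d) c hu
      have hset := pvMask_set _ hs (fun d => pre.count d) c hu
      rw [List.foldl_cons]
      simp only [hidx, Option.getD_some, hset]
      have hnext : (fun d => if d = c then (fun d => pre.count d) c + 1 else (fun d => pre.count d) d)
          = (fun d => (pre ++ [c]).count d) := by
        funext d
        by_cases hd : d = c
        · subst hd; simp [List.count_append, List.count_cons]
        · have hcd : ¬ c = d := fun h => hd (Eq.symm h)
          simp [List.count_append, List.count_cons, hd, hcd]
      rw [hnext, ih (pre ++ [c]) _ (by rw [hk, List.append_assoc]; rfl)]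
      have hcp : (PySem.List.sorted k (fun c => c) false).countP (fun d => decide (d < c))
          = k.countP (fun d => decide (d < c)) := hperm.countP_eq _
      simp only [pvRankAux, pvRank, List.append_assoc, List.singleton_append, hcp]
      push_cast
      rfl

lemma pv_A_eq (key : String) :
    get_key_order key
      = pvRankAux ((PySem.Str.upper key).toList) [] ((PySem.Str.upper key).toList) := by
  have h0 : (PySem.List.sorted ((PySem.Str.upper key).toList) (fun c => c) false).map some
      = pvMask (PySem.List.sorted ((PySem.Str.upper key).toList) (fun c => c) false)
          (fun d => ([] : List Char).count d) := by
    rw [show (fun d => ([] : List Char).count d) = (fun _ : Char => 0) from rfl, pvMask_zero]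
  simp only [get_key_order]
  rw [h0]
  exact pv_loopA _ _ [] [] rfl

-- B side --------------------------------------------------------------------

lemma pv_sum_indicator (s : List Char) (hnd : s.Nodup) (b : Char) :
    (s.map (fun x => if x = b then (1:Int) else 0)).sum = if b ∈ s then 1 else 0 := by
  induction s with
  | nil => simp
  | cons a t ih =>
      simp only [List.nodup_cons] at hnd
      simp only [List.map_cons, List.sum_cons, ih hnd.2, List.mem_cons]
      by_cases hab : a = b
      · subst hab
        simp [hnd.1]
      · simp [hab, Ne.symm hab]

lemma pv_sum_count_distinct (k : List Char) (p : Char → Bool) :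
    ∀ (s : List Char), s.Nodup → (∀ x ∈ s, p x = true) → (∀ x ∈ k, p x = true → x ∈ s) →
    (s.map (fun x => (k.count x : Int))).sum = (k.countP p : Int) := by
  induction k with
  | nil => intro s _ _ _; simp
  | cons b k' ih =>
      intro s hnd hps hcov
      have hsum := ih s hnd hps (fun x hx hp => hcov x (List.mem_cons_of_mem _ hx) hp)
      have hmap : (s.map (fun x => ((b :: k').count x : Int)))
          = s.map (fun x => (k'.count x : Int) + (if x = b then (1:Int) else 0)) := by
        apply List.map_congr_left; intro x _
        by_cases hxb : x = b
        · subst hxb; rw [List.count_cons_self, if_pos rfl]; push_cast; ring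
        · rw [List.count_cons_of_ne (show b ≠ x from fun h => hxb (Eq.symm h)), if_neg hxb, add_zero]
      rw [hmap, PySem.List.sum_map_add_int, hsum, pv_sum_indicator s hnd b, List.countP_cons]
      have hmem : (b ∈ s) ↔ (p b = true) :=
        ⟨fun h => hps b h, fun h => hcov b List.mem_cons_self h⟩
      by_cases hb : p b = true
      · rw [if_pos (hmem.mpr hb), if_pos hb]; push_cast; omega
      · rw [if_neg (fun h => hb (hmem.mp h)), if_neg hb]; push_cast; omega

lemma pv_startFold_not_mem (cnt : Char → Int) (t : List Char) :
    ∀ (p0 : PySem.Dict Char Int × Int) (c : Char), c ∉ t →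
    ((t.foldl (fun (p : PySem.Dict Char Int × Int) x => (p.1.insert x p.2, p.2 + cnt x)) p0).1).getD c 0
      = p0.1.getD c 0 := by
  induction t with
  | nil => intro p0 c _; rfl
  | cons a t ih =>
      intro p0 c hc
      simp only [List.mem_cons, not_or] at hc
      rw [List.foldl_cons, ih _ c hc.2]
      exact PySem.Dict.getD_insert_of_ne _ _ _ hc.1

lemma pv_startFold (cnt : Char → Int) (s : List Char) : s.Pairwise (· < ·) →
    ∀ (d0 : PySem.Dict Char Int) (i0 : Int) (c : Char), c ∈ s →
    ((s.foldl (fun (p : PySem.Dict Char Int × Int) x => (p.1.insert x p.2, p.2 + cnt x)) (d0, i0)).1).getD c 0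
      = i0 + ((s.filter (fun d => decide (d < c))).map cnt).sum := by
  induction s with
  | nil => intro _ _ _ c hc; cases hc
  | cons a t ih =>
      intro hp d0 i0 c hc
      rw [List.pairwise_cons] at hp
      obtain ⟨ha, hp'⟩ := hp
      rw [List.foldl_cons]
      rcases List.mem_cons.mp hc with hca | hct
      · subst hca
        have hnot : c ∉ t := fun h => absurd (ha c h) (lt_irrefl c)
        rw [pv_startFold_not_mem cnt t _ c hnot, PySem.Dict.getD_insert_self]
        have hfe : (c :: t).filter (fun d => decide (d < c)) = [] := by
          rw [List.filter_eq_nil_iff]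
          intro x hx
          rcases List.mem_cons.mp hx with h | h
          · simp [h]
          · simp only [decide_eq_true_eq]
            exact not_lt.mpr (le_of_lt (ha x h))
        rw [hfe]
        simp
      · rw [ih hp' (d0.insert a i0) (i0 + cnt a) c hct]
        have hfc : (a :: t).filter (fun d => decide (d < c))
            = a :: t.filter (fun d => decide (d < c)) := by
          rw [List.filter_cons, if_pos (by simp [ha c hct])]
        rw [hfc, List.map_cons, List.sum_cons]
        ring

lemma pv_loopB (k : List Char) (start : PySem.Dict Char Int)
    (hst : ∀ c ∈ k, start.getD c 0 = (k.countP (fun d => decide (d < c)) : Int)) :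
    ∀ (rest pre : List Char) (acc : List Int), (∀ c ∈ rest, c ∈ k) →
    (rest.foldl (fun (st : PySem.Dict Char Int × List Int) (c : Char) =>
       (st.1.insert c (st.1.getD c 0 + 1), st.2 ++ [start.getD c 0 + st.1.getD c 0]))
      (pre.foldl (fun (d : PySem.Dict Char Int) c => d.insert c (d.getD c 0 + 1)) PySem.Dict.empty, acc)).2
    = acc ++ pvRankAux k pre rest := by
  intro rest
  induction rest with
  | nil => intro pre acc _; simp [pvRankAux]
  | cons c t ih =>
      intro pre acc hmem
      have hr : ((pre.foldl (fun (d : PySem.Dict Char Int) c => d.insert c (d.getD c 0 + 1)) PySem.Dict.empty).getD c 0)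
          = (pre.count c : Int) := by
        rw [PySem.Dict.getD_foldl_insert_add_one, PySem.Dict.getD_empty]
        omega
      have hnd : (pre.foldl (fun (d : PySem.Dict Char Int) c => d.insert c (d.getD c 0 + 1)) PySem.Dict.empty).insert c
            ((pre.foldl (fun (d : PySem.Dict Char Int) c => d.insert c (d.getD c 0 + 1)) PySem.Dict.empty).getD c 0 + 1)
          = (pre ++ [c]).foldl (fun (d : PySem.Dict Char Int) c => d.insert c (d.getD c 0 + 1)) PySem.Dict.empty := by
        rw [List.foldl_append, List.foldl_cons, List.foldl_nil]
      rw [List.foldl_cons]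
      simp only [hnd]
      rw [ih (pre ++ [c]) _ (fun x hx => hmem x (List.mem_cons_of_mem _ hx))]
      simp only [pvRankAux, pvRank, List.append_assoc, List.singleton_append]
      rw [hst c (hmem c List.mem_cons_self), hr]

lemma pv_B_eq (key : String) :
    get_key_order_alt key
      = pvRankAux ((PySem.Str.upper key).toList) [] ((PySem.Str.upper key).toList) := by
  simp only [get_key_order_alt]
  generalize hk : (PySem.Str.upper key).toList = k
  have hkeys : (k.foldl (fun (d : PySem.Dict Char Int) c => d.insert c (d.getD c 0 + 1)) PySem.Dict.empty).keys
      = PySem.Set.ofList k := by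
    rw [PySem.Dict.keys_foldl_insert]
    rfl
  have hcounts : ∀ x : Char,
      (k.foldl (fun (d : PySem.Dict Char Int) c => d.insert c (d.getD c 0 + 1)) PySem.Dict.empty).getD x 0
        = (k.count x : Int) := by
    intro x
    rw [PySem.Dict.getD_foldl_insert_add_one, PySem.Dict.getD_empty]
    omega
  rw [hkeys]
  have hp : (PySem.List.sorted (PySem.Set.ofList k) (fun x => x) false).Pairwise (· < ·) :=
    PySem.List.sorted_ofList_pairwise_lt k
  have hnds : (PySem.List.sorted (PySem.Set.ofList k) (fun x => x) false).Nodup :=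
    hp.imp fun h => ne_of_lt h
  have hst : ∀ c ∈ k,
      ((((PySem.List.sorted (PySem.Set.ofList k) (fun x => x) false)).foldl
        (fun (p : PySem.Dict Char Int × Int) c =>
          (p.1.insert c p.2, p.2 + (k.foldl (fun (d : PySem.Dict Char Int) c => d.insert c (d.getD c 0 + 1)) PySem.Dict.empty).getD c 0))
        (PySem.Dict.empty, 0)).1).getD c 0
      = (k.countP (fun d => decide (d < c)) : Int) := by
    intro c hck
    have hcs : c ∈ PySem.List.sorted (PySem.Set.ofList k) (fun x => x) false := by
      rw [PySem.List.mem_sorted, PySem.Set.mem_ofList]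
      exact hck
    rw [pv_startFold _ _ hp PySem.Dict.empty 0 c hcs]
    have hmapc : (((PySem.List.sorted (PySem.Set.ofList k) (fun x => x) false).filter
          (fun d => decide (d < c))).map
          (fun x => (k.foldl (fun (d : PySem.Dict Char Int) c => d.insert c (d.getD c 0 + 1)) PySem.Dict.empty).getD x 0))
        = ((PySem.List.sorted (PySem.Set.ofList k) (fun x => x) false).filter
          (fun d => decide (d < c))).map (fun x => (k.count x : Int)) := by
      apply List.map_congr_left; intro x _; exact hcounts x
    rw [hmapc, pv_sum_count_distinct k (fun d => decide (d < c)) _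
        (hnds.filter _)
        (fun x hx => (List.mem_filter.mp hx).2)
        (fun x hxk hpx => List.mem_filter.mpr
          ⟨by rw [PySem.List.mem_sorted, PySem.Set.mem_ofList]; exact hxk, hpx⟩)]
    omega
  exact pv_loopB k _ hst k [] [] (fun c hc => hc)

-- ===== VERDICT (by name: the statement is the Claim_ definition above) =====
theorem get_key_order_spec : Claim_equal_get_key_order := by
  intro key _
  unfold Spec_get_key_order
  rw [pv_A_eq, pv_B_eq]
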